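-- pv_equiv track=rewrite | github.com/zeemanUka/Document-Analyzer | app/logic.py | _wrap_multiple_top_objects
-- ===== SOURCE A (Python) =====
-- def _wrap_multiple_top_objects(text: str) -> str | None:
--     """
--     Wrap multiple top-level JSON objects into an array if they are printed one after another.
--     """
--     objs = []
--     i = 0
--     s = text.strip()
--     while True:
--         j = s.find("{", i)
--         if j == -1:
--             break
--         depth = 0
--         in_str = False
--         esc = False
--         found = False
--         for k in range(j, len(s)):
--             ch = s[k]
--             if ch == '"' and not esc:
--                 in_str = not in_str
--             if ch == "\\" and not esc:
--                 esc = True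
--                 continue
--             esc = False
--             if in_str:
--                 continue
--             if ch == "{":
--                 depth += 1
--             elif ch == "}":
--                 depth -= 1
--                 if depth == 0:
--                     objs.append(s[j : k + 1])
--                     i = k + 1
--                     found = True
--                     break
--         if not found:
--             break
--     if len(objs) >= 2:
--         return "[" + ",".join(objs) + "]"
--     return None
-- ===== SOURCE B (Python) =====
-- def _wrap_multiple_top_objects(text: str) -> str | None:
--     """Single flat pass over the stripped text with a depth/string/escape
--     state machine; collects object characters instead of re-scanning with find/slices."""
--     s = text.strip()
--     objs = []
--     cur = []
--     depth = 0
--     in_str = False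
--     esc = False
--     for ch in s:
--         if depth == 0:
--             # between objects: ignore everything except an opening brace
--             if ch == "{":
--                 cur = [ch]
--                 depth = 1
--                 in_str = False
--                 esc = False
--             continue
--         cur.append(ch)
--         if ch == '"' and not esc:
--             in_str = not in_str
--         if ch == "\\" and not esc:
--             esc = True
--             continue
--         esc = False
--         if in_str:
--             continue
--         if ch == "{":
--             depth += 1
--         elif ch == "}":
--             depth -= 1
--             if depth == 0:
--                 objs.append("".join(cur))
--     if len(objs) >= 2:
--         return "[" + ",".join(objs) + "]"
--     return None
-- ===== Notes on version B (the rewrite author's own statement) =====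
-- stated objective: alternative
-- what changed: A repeatedly calls find('{') and re-scans with a nested brace-counting loop taking slices; B is a single flat pass over the stripped string with a depth/in-string/escape state machine that accumulates the current object's characters, ignoring quotes between objects exactly as A's find-skip does.
import Mathlib
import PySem

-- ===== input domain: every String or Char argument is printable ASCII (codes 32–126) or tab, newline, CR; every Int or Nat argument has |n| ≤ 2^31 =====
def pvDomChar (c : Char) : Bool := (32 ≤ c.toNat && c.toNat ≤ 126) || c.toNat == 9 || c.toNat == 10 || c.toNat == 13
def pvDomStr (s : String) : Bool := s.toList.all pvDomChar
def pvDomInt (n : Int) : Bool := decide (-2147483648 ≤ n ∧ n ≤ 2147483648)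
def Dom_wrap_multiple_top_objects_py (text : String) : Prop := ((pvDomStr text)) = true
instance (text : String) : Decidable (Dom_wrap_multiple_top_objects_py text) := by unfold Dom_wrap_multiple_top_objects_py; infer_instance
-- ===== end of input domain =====

-- B replaces A's repeated find('{') + nested rescanning loop by one flat state-machine
-- pass that accumulates the current object's characters (objective: alternative, same cost).

-- ===== PORT A =====
-- A's inner `for k in range(j, len(s))` loop over the suffix that starts at the found '{':
-- state (depth, in_str, esc) as in A; the characters A's slice s[j:k+1] consists of are
-- accumulated in reverse in `acc`. Returns the object and the suffix after it (A's i = k+1),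
-- or none when the loop runs off the end (A's `found` stays False and the outer loop breaks).
def scanA : List Char → Int → Bool → Bool → List Char → Option (List Char × List Char)
  | [], _, _, _, _ => none
  | ch :: rest, depth, in_str, esc, acc =>
    let in_str1 := if ch = '"' && !esc then !in_str else in_str
    if ch = '\\' && !esc then scanA rest depth in_str1 true (ch :: acc)
    else if in_str1 then scanA rest depth in_str1 false (ch :: acc)
    else if ch = '{' then scanA rest (depth + 1) in_str1 false (ch :: acc)
    else if ch = '}' then
      (if depth - 1 = 0 then some ((ch :: acc).reverse, rest)
       else scanA rest (depth - 1) in_str1 false (ch :: acc))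
    else scanA rest depth in_str1 false (ch :: acc)

-- termination helper for loopA's `while True` (cited by name in decreasing_by)
theorem scanA_some_length : ∀ (l : List Char) (d : Int) (is es : Bool) (acc o r : List Char),
    scanA l d is es acc = some (o, r) → r.length < l.length := by
  intro l
  induction l with
  | nil => intro d is es acc o r h; simp [scanA] at h
  | cons ch rest ih =>
    intro d is es acc o r
    simp only [scanA]
    split_ifs <;> intro h
    all_goals first
      | exact Nat.lt_succ_of_lt (ih _ _ _ _ _ _ h)
      | (simp only [Option.some.injEq, Prod.mk.injEq] at h
         rw [← h.2]
         simp)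

-- A's `while True` loop: `s.find("{", i)` skips everything before the next '{' (exact:
-- find returns the index of the first '{' at or after i, i.e. dropWhile on the suffix;
-- find = -1, A's break, is dropWhile = [], on which scanA returns none), then the inner scan.
def loopA (l : List Char) : List (List Char) :=
  match hs : scanA (l.dropWhile (· ≠ '{')) 0 false false [] with
  | none => []
  | some (obj, rest) => obj :: loopA rest
termination_by l.length
decreasing_by
  have h1 : (l.dropWhile (· ≠ '{')).length ≤ l.length := (List.dropWhile_sublist _).length_le
  exact Nat.lt_of_lt_of_le (scanA_some_length _ _ _ _ _ _ _ hs) h1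

def wrap_multiple_top_objects_py (text : String) : Option String :=
  let s := (PySem.Str.strip text).toList
  let objs := loopA s
  if 2 ≤ objs.length then
    some (String.ofList ('[' :: PySem.Chars.join [','] objs ++ [']']))
  else none

-- ===== PORT B =====
-- B's single `for ch in s` loop: parameters are B's loop variables (cur in reverse,
-- objs in reverse — Python appends at the right, the port conses and reverses at the end).
def stepB : List Char → List Char → Int → Bool → Bool → List (List Char) → List (List Char)
  | [], _, _, _, _, objs => objs.reverse
  | ch :: rest, cur, depth, in_str, esc, objs =>
    if depth = 0 then
      (if ch = '{' then stepB rest [ch] 1 false false objs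
       else stepB rest cur depth in_str esc objs)
    else
      let cur1 := ch :: cur
      let in_str1 := if ch = '"' && !esc then !in_str else in_str
      if ch = '\\' && !esc then stepB rest cur1 depth in_str1 true objs
      else if in_str1 then stepB rest cur1 depth in_str1 false objs
      else if ch = '{' then stepB rest cur1 (depth + 1) in_str1 false objs
      else if ch = '}' then
        (if depth - 1 = 0 then stepB rest cur1 (depth - 1) in_str1 false (cur1.reverse :: objs)
         else stepB rest cur1 (depth - 1) in_str1 false objs)
      else stepB rest cur1 depth in_str1 false objs

def wrap_multiple_top_objects_py_alt (text : String) : Option String :=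
  let s := (PySem.Str.strip text).toList
  let objs := stepB s [] 0 false false []
  if 2 ≤ objs.length then
    some (String.ofList ('[' :: PySem.Chars.join [','] objs ++ [']']))
  else none

-- ===== PRECONDITION & SPEC =====
def Spec_wrap_multiple_top_objects_py (text : String) (out : Option String) : Prop := out = wrap_multiple_top_objects_py_alt text
instance (text : String) (out : Option String) : Decidable (Spec_wrap_multiple_top_objects_py text out) := by unfold Spec_wrap_multiple_top_objects_py; infer_instance

-- ===== CLAIM (what is proved, stated in full; the proofs are below) =====
def Claim_equal_wrap_multiple_top_objects_py : Prop := ∀ (text : String), Dom_wrap_multiple_top_objects_py text → Spec_wrap_multiple_top_objects_py text (wrap_multiple_top_objects_py text)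

-- ===== LEMMAS AND PROOFS =====

-- B's depth-0 mode ignores cur/in_str/esc (they are reset at the next '{').
theorem stepB_depth0_congr : ∀ (l c c' : List Char) (d : Int) (a b a' b' : Bool)
    (objs : List (List Char)), d = 0 →
    stepB l c d a b objs = stepB l c' 0 a' b' objs := by
  intro l
  induction l with
  | nil => intro c c' d a b a' b' objs hd; simp [stepB]
  | cons ch rest ih =>
    intro c c' d a b a' b' objs hd
    subst hd
    by_cases h : ch = '{'
    · simp [stepB, h]
    · simp only [stepB, if_neg h]
      exact ih c c' 0 a b a' b' objs rfl

-- B's depth>0 mode computes A's inner scan, then resumes the depth-0 mode on the rest.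
theorem stepB_scan : ∀ (l cur : List Char) (d : Int) (is es : Bool) (objs : List (List Char)),
    1 ≤ d →
    stepB l cur d is es objs =
      (match scanA l d is es cur with
       | none => objs.reverse
       | some (obj, rest) => stepB rest [] 0 false false (obj :: objs)) := by
  intro l
  induction l with
  | nil => intro cur d is es objs hd; simp [stepB, scanA]
  | cons ch rest ih =>
    intro cur d is es objs hd
    have hd0 : ¬ d = 0 := by omega
    simp only [stepB, scanA, if_neg hd0]
    split_ifs
    all_goals first
      | exact ih _ _ _ _ _ (by omega)
      | exact stepB_depth0_congr _ _ _ _ _ _ _ _ _ (by omega)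

theorem loopA_unfold (l : List Char) : loopA l =
    match scanA (l.dropWhile (· ≠ '{')) 0 false false [] with
    | none => []
    | some (obj, rest) => obj :: loopA rest := by
  rw [loopA]
  cases hsc : scanA (l.dropWhile (· ≠ '{')) 0 false false [] with
  | none => rfl
  | some p => rfl

-- B's whole pass equals A's find/rescan loop, with the objects collected so far in front.
theorem stepB_zero : ∀ (n : Nat) (l : List Char), l.length ≤ n → ∀ (objs : List (List Char)),
    stepB l [] 0 false false objs = objs.reverse ++ loopA l := by
  intro n
  induction n with
  | zero =>
    intro l hl objs
    have : l = [] := by cases l with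
      | nil => rfl
      | cons a t => simp at hl
    subst this
    rw [loopA_unfold]
    simp [stepB, scanA]
  | succ n ih =>
    intro l hl objs
    cases l with
    | nil => rw [loopA_unfold]; simp [stepB, scanA]
    | cons ch rest =>
      have hrest : rest.length ≤ n := by simpa using hl
      by_cases h : ch = '{'
      · subst h
        have h1 : stepB ('{' :: rest) [] 0 false false objs
            = stepB rest ['{'] 1 false false objs := by simp [stepB]
        rw [h1, stepB_scan rest ['{'] 1 false false objs (by omega), loopA_unfold]
        have hdw : ('{' :: rest).dropWhile (· ≠ '{') = '{' :: rest := by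
          simp
        rw [hdw]
        have hsc : scanA ('{' :: rest) 0 false false [] = scanA rest 1 false false ['{'] := by
          simp [scanA]
        rw [hsc]
        cases hs : scanA rest 1 false false ['{'] with
        | none => simp
        | some p =>
          obtain ⟨obj, r⟩ := p
          have hr : r.length ≤ n :=
            Nat.le_of_lt (Nat.lt_of_lt_of_le (scanA_some_length _ _ _ _ _ _ _ hs) hrest)
          simp [ih r hr (obj :: objs)]
      · have h1 : stepB (ch :: rest) [] 0 false false objs
            = stepB rest [] 0 false false objs := by simp [stepB, h]
        have h2 : loopA (ch :: rest) = loopA rest := by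
          rw [loopA_unfold, loopA_unfold]
          have hdw : (ch :: rest).dropWhile (· ≠ '{') = rest.dropWhile (· ≠ '{') := by
            simp [h]
          rw [hdw]
        rw [h1, h2, ih rest hrest objs]

theorem stepB_eq_loopA (l : List Char) : stepB l [] 0 false false [] = loopA l :=
  stepB_zero l.length l (Nat.le_refl _) []

-- ===== VERDICT (by name: the statement is the Claim_ definition above) =====
theorem wrap_multiple_top_objects_py_spec : Claim_equal_wrap_multiple_top_objects_py := by
  intro text _
  simp only [Spec_wrap_multiple_top_objects_py, wrap_multiple_top_objects_py,
    wrap_multiple_top_objects_py_alt, stepB_eq_loopA]
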